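-- pv_equiv track=rewrite | github.com/Cryptolemming/algo-toolbox | week3/6.py | max_prizes
-- ===== SOURCE A (Python) =====
-- def max_prizes(n):
--     result = []
--     i = 1
--     while n > 0:
--         diff = n - i
--         if diff > i:
--             result.append(str(i))
--             n -= i
--             i += 1
--         else:
--             result.append(str(n))
--             n -= n
--
--     return result;
-- ===== SOURCE B (Python) =====
-- def max_prizes(n):
--     if n <= 0:
--         return []
--     # largest k with k*(k+1)//2 <= n, by exponential growth + binary search
--     lo, hi = 1, 1
--     while hi * (hi + 1) // 2 <= n:
--         hi *= 2
--     while lo + 1 < hi: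
--         mid = (lo + hi) // 2
--         if mid * (mid + 1) // 2 <= n:
--             lo = mid
--         else:
--             hi = mid
--     k = lo
--     rest = n - k * (k + 1) // 2
--     return [str(i) for i in range(1, k)] + [str(k + rest)]
-- ===== Notes on version B (the rewrite author's own statement) =====
-- stated objective: alternative
-- what changed: Replaced the step-by-step greedy subtraction loop (one iteration and one append per prize) by a direct computation: binary-search the prize count k as the largest index whose triangular number fits in n, then build the list of the first k-1 integers and fold the remainder into the last prize.
import Mathlib
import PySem

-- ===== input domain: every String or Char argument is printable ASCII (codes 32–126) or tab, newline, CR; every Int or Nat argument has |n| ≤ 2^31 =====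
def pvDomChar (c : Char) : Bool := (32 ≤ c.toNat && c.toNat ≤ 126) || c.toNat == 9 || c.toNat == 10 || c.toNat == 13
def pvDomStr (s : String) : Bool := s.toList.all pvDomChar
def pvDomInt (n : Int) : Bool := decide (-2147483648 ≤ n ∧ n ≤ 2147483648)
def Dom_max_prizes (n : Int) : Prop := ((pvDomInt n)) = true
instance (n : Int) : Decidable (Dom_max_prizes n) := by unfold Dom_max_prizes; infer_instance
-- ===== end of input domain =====

-- B replaces A's step-by-step greedy subtraction loop by a binary search for the
-- number of prizes plus direct list construction (alternative algorithm).

-- ===== PORT A =====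
-- A's while loop; i0 stores Python's i as i = i0 + 1 (i only ever increments from 1),
-- making termination evident.
def maxPrizesLoopA (n : Int) (i0 : Nat) : List String :=
  if n > 0 then
    let i : Int := (i0 : Int) + 1
    let diff := n - i
    if diff > i then
      PySem.Int.toStr i :: maxPrizesLoopA (n - i) (i0 + 1)
    else
      [PySem.Int.toStr n]
  else []
termination_by n.toNat
decreasing_by omega

def max_prizes (n : Int) : List String := maxPrizesLoopA n 0

-- ===== PORT B =====
-- Source B's growth loop 'while hi*(hi+1)//2 <= n: hi *= 2'; h0 stores hi as hi = h0 + 1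
-- (hi only ever doubles from 1), making termination evident.
def maxPrizesGrow (n : Int) (h0 : Nat) : Nat :=
  if PySem.Int.floordiv (((h0 : Int) + 1) * (((h0 : Int) + 1) + 1)) 2 ≤ n then
    maxPrizesGrow n (2 * h0 + 1)
  else h0 + 1
termination_by n.toNat - h0
decreasing_by
  have h1 : ((h0 : Int) + 1) ≤ PySem.Int.floordiv (((h0 : Int) + 1) * (((h0 : Int) + 1) + 1)) 2 := by
    rw [PySem.Int.le_floordiv_iff_mul_le (by omega)]
    nlinarith [Int.natCast_nonneg h0]
  omega

-- Source B's binary-search loop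
def maxPrizesSearch (n : Int) (lo hi : Nat) : Nat :=
  if lo + 1 < hi then
    let mid := (lo + hi) / 2
    if PySem.Int.floordiv ((mid : Int) * ((mid : Int) + 1)) 2 ≤ n then
      maxPrizesSearch n mid hi
    else
      maxPrizesSearch n lo mid
  else lo
termination_by hi - lo
decreasing_by all_goals omega

def max_prizes_alt (n : Int) : List String :=
  if n ≤ 0 then []
  else
    let hi := maxPrizesGrow n 0
    let k := maxPrizesSearch n 1 hi
    let rest := n - PySem.Int.floordiv ((k : Int) * ((k : Int) + 1)) 2
    ((PySem.List.pyRange 1 (k : Int) 1).map PySem.Int.toStr) ++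
      [PySem.Int.toStr ((k : Int) + rest)]

-- ===== PRECONDITION & SPEC =====
def Spec_max_prizes (n : Int) (out : List String) : Prop := out = max_prizes_alt n
instance (n : Int) (out : List String) : Decidable (Spec_max_prizes n out) := by unfold Spec_max_prizes; infer_instance

-- ===== CLAIM (what is proved, stated in full; the proofs are below) =====
def Claim_equal_max_prizes : Prop := ∀ (n : Int), Dom_max_prizes n → Spec_max_prizes n (max_prizes n)

-- ===== LEMMAS AND PROOFS =====

-- triangular numbers
def triI : Nat → Int
  | 0 => 0
  | j + 1 => triI j + (j + 1)

theorem triI_mono {a b : Nat} (h : a ≤ b) : triI a ≤ triI b := by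
  induction b with
  | zero =>
    have ha : a = 0 := by omega
    simp [ha]
  | succ b ih =>
    rcases Nat.lt_or_ge a (b+1) with hlt | hge
    · have := ih (by omega)
      simp only [triI]; omega
    · have ha : a = b + 1 := by omega
      simp [ha]

theorem two_mul_triI (j : Nat) : 2 * triI j = (j : Int) * ((j : Int) + 1) := by
  induction j with
  | zero => simp [triI]
  | succ j ih => simp only [triI]; push_cast; linear_combination ih

theorem floordiv_triI (j : Nat) :
    PySem.Int.floordiv ((j : Int) * ((j : Int) + 1)) 2 = triI j := by
  rw [PySem.Int.floordiv_eq_iff_of_pos (by omega)]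
  have := two_mul_triI j
  constructor <;> omega

-- characterization of A's loop: if triI k ≤ n < triI (k+1) and j+1+d = k then
-- the loop from state (n - triI j, i0 = j) produces j+1, …, k-1 and the last prize.
theorem loopA_char (n : Int) (k : Nat) (hk : triI k ≤ n) (hk' : n < triI (k + 1)) :
    ∀ (d j : Nat), j + 1 + d = k →
      maxPrizesLoopA (n - triI j) j =
        ((List.range' (j + 1) d).map (fun m : Nat => PySem.Int.toStr (m : Int))) ++
          [PySem.Int.toStr ((k : Int) + (n - triI k))] := by
  intro d
  induction d with
  | zero =>
    intro j hj
    have hjk : j + 1 = k := by omega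
    subst hjk
    have hTj : triI (j + 1) = triI j + (j + 1 : Int) := by simp only [triI]
    have hTj2 : triI (j + 1 + 1) = triI (j + 1) + (j + 2 : Int) := by
      simp only [triI]; push_cast; ring
    rw [maxPrizesLoopA]
    have hpos : n - triI j > 0 := by omega
    rw [if_pos hpos]
    have hcond : ¬ (n - triI j - ((j : Int) + 1) > (j : Int) + 1) := by omega
    rw [if_neg hcond]
    simp only [List.range'_zero, List.map_nil, List.nil_append]
    congr 2
    push_cast
    omega
  | succ d ih =>
    intro j hj
    have hTj : triI (j + 1) = triI j + (j + 1 : Int) := by simp only [triI]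
    have hTj2 : triI (j + 2) = triI (j + 1) + (j + 2 : Int) := by simp only [triI]; push_cast; ring
    have hmono : triI (j + 2) ≤ triI k := triI_mono (by omega)
    have hmono1 : triI (j + 1) ≤ triI k := triI_mono (by omega)
    rw [maxPrizesLoopA]
    have hpos : n - triI j > 0 := by omega
    rw [if_pos hpos]
    have hcond : n - triI j - ((j : Int) + 1) > (j : Int) + 1 := by omega
    rw [if_pos hcond]
    have harg : n - triI j - ((j : Int) + 1) = n - triI (j + 1) := by rw [hTj]; ring
    rw [harg, ih (j + 1) (by omega)]
    rw [List.range'_succ]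
    simp only [List.map_cons, List.cons_append]
    push_cast
    ring_nf

-- B's growth loop: result hi satisfies n < triI hi, and hi ≥ h0+1.
theorem grow_spec (n : Int) : ∀ (h0 : Nat), n < triI (maxPrizesGrow n h0) ∧ h0 + 1 ≤ maxPrizesGrow n h0 := by
  intro h0
  induction h0 using maxPrizesGrow.induct n with
  | case1 h0 hc ih =>
    rw [maxPrizesGrow, if_pos hc]
    exact ⟨ih.1, by omega⟩
  | case2 h0 hc =>
    rw [maxPrizesGrow, if_neg hc]
    rw [show ((h0 : Int) + 1) * (((h0 : Int) + 1) + 1) = ((h0 + 1 : Nat) : Int) * (((h0 + 1 : Nat) : Int) + 1) by push_cast; ring,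
      floordiv_triI] at hc
    exact ⟨by omega, by omega⟩

-- B's binary search: from a bracketing interval it returns the exact k.
theorem search_spec (n : Int) : ∀ (lo hi : Nat), 1 ≤ lo → lo < hi →
    triI lo ≤ n → n < triI hi →
    1 ≤ maxPrizesSearch n lo hi ∧ triI (maxPrizesSearch n lo hi) ≤ n ∧
      n < triI (maxPrizesSearch n lo hi + 1) := by
  intro lo hi
  induction lo, hi using maxPrizesSearch.induct n with
  | case1 lo hi hlt mid hc ih =>
    intro h1 _ hlo hhi
    rw [maxPrizesSearch, if_pos hlt]
    simp only [mid] at *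
    rw [if_pos hc]
    rw [show ((lo + hi) / 2 : Nat) * (((lo + hi) / 2 : Nat) + (1 : Int)) =
      (((lo + hi) / 2 : Nat) : Int) * ((((lo + hi) / 2 : Nat) : Int) + 1) from by push_cast; ring] at hc
    rw [floordiv_triI] at hc
    exact ih (by omega) (by omega) hc hhi
  | case2 lo hi hlt mid hc ih =>
    intro h1 _ hlo hhi
    rw [maxPrizesSearch, if_pos hlt]
    simp only [mid] at *
    rw [if_neg hc]
    rw [show ((lo + hi) / 2 : Nat) * (((lo + hi) / 2 : Nat) + (1 : Int)) =
      (((lo + hi) / 2 : Nat) : Int) * ((((lo + hi) / 2 : Nat) : Int) + 1) from by push_cast; ring] at hc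
    rw [floordiv_triI] at hc
    exact ih h1 (by omega) hlo (by omega)
  | case3 lo hi hlt =>
    intro h1 h2 hlo hhi
    rw [maxPrizesSearch, if_neg hlt]
    have : hi = lo + 1 := by omega
    subst this
    exact ⟨h1, hlo, hhi⟩

-- pyRange 1 k 1 mapped by toStr is range' 1 (k-1) mapped by toStr ∘ cast
theorem pyRange_one_natCast (k : Nat) :
    PySem.List.pyRange 1 (k : Int) 1 = (List.range' 1 (k - 1)).map (fun m : Nat => (m : Int)) := by
  rw [PySem.List.pyRange_one, List.range'_eq_map_range, List.map_map]
  have h1 : ((k : Int) - 1).toNat = k - 1 := by omega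
  rw [h1]
  apply List.map_congr_left
  intro a _
  simp

theorem max_prizes_eq (n : Int) : max_prizes n = max_prizes_alt n := by
  rcases le_or_gt n 0 with hn | hn
  · rw [max_prizes, maxPrizesLoopA, max_prizes_alt, if_pos hn, if_neg (by omega)]
  · obtain ⟨hg1, hg2⟩ := grow_spec n 0
    have h1 : triI 1 ≤ n := by norm_num [triI]; omega
    have hgt : 1 < maxPrizesGrow n 0 := by
      by_contra h
      have he : maxPrizesGrow n 0 = 1 := by omega
      rw [he] at hg1
      omega
    obtain ⟨hs1, hs2, hs3⟩ := search_spec n 1 (maxPrizesGrow n 0) le_rfl hgt h1 hg1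
    set k := maxPrizesSearch n 1 (maxPrizesGrow n 0) with hkdef
    have hA := loopA_char n k hs2 hs3 (k - 1) 0 (by omega)
    rw [show n - triI 0 = n from by simp [triI]] at hA
    rw [max_prizes, hA]
    simp only [max_prizes_alt, if_neg (show ¬ n ≤ 0 by omega), ← hkdef]
    rw [floordiv_triI, pyRange_one_natCast, List.map_map]
    simp [Function.comp]

-- ===== VERDICT (by name: the statement is the Claim_ definition above) =====
theorem max_prizes_spec : Claim_equal_max_prizes := by
  intro n _
  unfold Spec_max_prizes
  exact max_prizes_eq n
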